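-- pv_equiv track=rewrite | github.com/JoeyNiestroy/Sentiment140-Classification-with-groundup-embedding | Pre_Process.py | while_replace
-- ===== SOURCE A (Python) =====
-- def while_replace(tweet):
--     while '  ' in tweet:
--         tweet = tweet.replace('  ', ' ')
--     new = ""
--     for index in range(0,len(tweet)):
--         char = tweet[index]
--         if index == 0 or index == len(tweet)-1:
--             new += char
--         else:
--             if tweet[index-1] == char and tweet[index+1] == char:
--                 pass
--             else:
--
--                 new += char
--
--     return new
-- ===== SOURCE B (Python) =====
-- def while_replace(tweet):
--     # one left-to-right pass over maximal runs of equal characters: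
--     # a run of spaces becomes a single space, any other run is capped at two characters
--     out = []
--     i = 0
--     n = len(tweet)
--     while i < n:
--         ch = tweet[i]
--         j = i
--         while j < n and tweet[j] == ch:
--             j += 1
--         out.append(' ' if ch == ' ' else ch * min(j - i, 2))
--         i = j
--     return ''.join(out)
-- ===== Notes on version B (the rewrite author's own statement) =====
-- stated objective: alternative
-- what changed: A repeatedly rewrites double spaces to single ones until a fixpoint and then filters every index by comparing both neighbours; B makes a single left-to-right pass over maximal runs of equal characters, emitting one space per space run and min(len,2) copies of any other run.
import Mathlib
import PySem

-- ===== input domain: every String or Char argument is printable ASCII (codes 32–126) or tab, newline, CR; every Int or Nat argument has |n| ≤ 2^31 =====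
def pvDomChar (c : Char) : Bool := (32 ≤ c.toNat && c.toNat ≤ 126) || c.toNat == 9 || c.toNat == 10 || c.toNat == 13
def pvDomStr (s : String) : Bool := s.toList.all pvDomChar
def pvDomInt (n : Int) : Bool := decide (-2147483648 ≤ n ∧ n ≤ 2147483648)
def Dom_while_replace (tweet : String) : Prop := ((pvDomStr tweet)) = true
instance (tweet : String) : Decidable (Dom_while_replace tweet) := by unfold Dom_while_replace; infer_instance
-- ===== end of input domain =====

-- B replaces A's two phases (a repeated replace pass collapsing double spaces plus an index
-- loop testing both neighbours of every character) by a single left-to-right scan over maximal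
-- runs of equal characters, emitting one space per space run and min(len, 2) copies of any
-- other run; objective: alternative (a single run-grouping pass instead of fixpoint rewriting).

-- ===== PORT A =====
-- `rep` is one pass of tweet.replace('  ', ' '); proved equal to PySem's replace below and
-- used only to justify termination of A's while loop (the length strictly decreases).
def rep : List Char → List Char
  | ' ' :: ' ' :: t => ' ' :: rep t
  | c :: t => c :: rep t
  | [] => []

theorem rep_cons₂ (c b : Char) (t : List Char) (h : ¬(c = ' ' ∧ b = ' ')) :
    rep (c :: b :: t) = c :: rep (b :: t) := by
  rw [rep.eq_def]
  split
  · rename_i heq; injection heq with h1 h2; injection h2 with h2 h3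
    exact absurd ⟨h1, h2⟩ h
  · rename_i heq; injection heq with h1 h2; subst h1; subst h2; rfl
  · rename_i heq; cases heq

theorem go_eq_rep : ∀ (fuel : Nat) (l acc : List Char), l.length ≤ fuel →
    PySem.Chars.replace.go [' ', ' '] [' '] fuel l acc = acc.reverse ++ rep l := by
  intro fuel
  induction fuel with
  | zero =>
    intro l acc h
    have : l = [] := List.eq_nil_of_length_eq_zero (Nat.le_zero.mp h)
    subst this
    simp [PySem.Chars.replace.go, rep]
  | succ n ih =>
    intro l acc h
    match l with
    | [] => simp [PySem.Chars.replace.go, rep]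
    | c :: t =>
      rw [PySem.Chars.replace.go]
      match t with
      | [] =>
        have hp : [' ', ' '].isPrefixOf [c] = false := by
          simp [List.isPrefixOf]
        simp only [hp, Bool.false_eq_true, if_false]
        have := ih [] (c :: acc) (by simp)
        simp [this]
        by_cases hc : c = ' ' <;> simp [hc, rep]
      | b :: t' =>
        by_cases hcb : c = ' ' ∧ b = ' '
        · obtain ⟨hc, hb⟩ := hcb; subst hc; subst hb
          have hp : [' ', ' '].isPrefixOf (' ' :: ' ' :: t') = true := by
            simp [List.isPrefixOf]
          simp only [hp, if_true]
          have := ih t' (' ' :: acc) (by simp at h ⊢; omega)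
          simp at this
          simp [this, rep]
        · have hp : [' ', ' '].isPrefixOf (c :: b :: t') = false := by
            rcases not_and_or.mp hcb with hc | hb
            · simp [List.isPrefixOf]; intro h'; exact absurd h'.symm hc
            · simp [List.isPrefixOf]; intro _ h'; exact absurd h'.symm hb
          simp only [hp, Bool.false_eq_true, if_false]
          rw [ih (b :: t') (c :: acc) (by simp at h ⊢; omega), rep_cons₂ c b t' hcb]
          simp

theorem replace_eq_rep (l : List Char) :
    PySem.Chars.replace l [' ', ' '] [' '] = rep l := by
  rw [PySem.Chars.replace]
  simp [go_eq_rep l.length l [] le_rfl]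

theorem length_rep_le (l : List Char) : (rep l).length ≤ l.length := by
  induction l using rep.induct with
  | case1 t ih => simp [rep]; omega
  | case2 c t hne ih =>
    match t, hne with
    | [], _ => simp [rep]
    | b :: t', hne =>
      rw [rep_cons₂ c b t' (by intro ⟨h1, h2⟩; exact hne t' h1 (by rw [h2]))]
      simp at ih ⊢; omega
  | case3 => simp [rep]

theorem length_rep_lt (l : List Char) (h : [' ', ' '] <:+: l) :
    (rep l).length < l.length := by
  induction l using rep.induct with
  | case1 t ih =>
    have := length_rep_le t
    simp [rep]; omega
  | case2 c t hne ih =>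
    match t, hne with
    | [], _ =>
      exfalso
      have := h.length_le
      simp at this
    | b :: t', hne =>
      have hcb : ¬(c = ' ' ∧ b = ' ') := by
        intro ⟨h1, h2⟩; exact hne t' h1 (by rw [h2])
      rw [rep_cons₂ c b t' hcb]
      have ht : [' ', ' '] <:+: b :: t' := by
        rcases List.infix_cons_iff.mp h with hpre | hinf
        · exfalso
          rcases hpre with ⟨s, hs⟩
          injection hs with h1 h2
          injection h2 with h2 h3
          exact hcb ⟨h1.symm, h2.symm⟩
        · exact hinf
      have := ih ht
      simp at this ⊢; omega
  | case3 =>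
    exfalso
    have := h.length_le
    simp at this

-- the while loop of A: keep replacing '  ' by ' ' until no '  ' remains
def collapse (l : List Char) : List Char :=
  if PySem.Chars.isIn [' ', ' '] l then collapse (PySem.Chars.replace l [' ', ' '] [' ']) else l
  termination_by l.length
  decreasing_by
    rw [replace_eq_rep]
    exact length_rep_lt l ((PySem.Chars.isIn_iff_infix _ _).mp ‹_›)

def while_replace (tweet : String) : String :=
  let t := collapse tweet.toList
  String.ofList
    ((PySem.List.pyRange 0 (t.length : Int) 1).foldl
      (fun (new : List Char) index =>
        let char := PySem.List.pyGetD t index ' '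
        if index = 0 ∨ index = (t.length : Int) - 1 then new ++ [char]
        else if PySem.List.pyGetD t (index - 1) ' ' = char ∧
                PySem.List.pyGetD t (index + 1) ' ' = char then new
        else new ++ [char])
      [])

-- ===== PORT B =====
-- one pass over maximal runs: a space run becomes one space, any other run is capped at 2
def bcore : List Char → List Char
  | [] => []
  | c :: t =>
    (if c = ' ' then [' '] else List.replicate (min (1 + (t.takeWhile (· == c)).length) 2) c)
      ++ bcore (t.dropWhile (· == c))
  termination_by l => l.length
  decreasing_by
    have := List.length_dropWhile_le (· == c) t
    simp; omega

def while_replace_alt (tweet : String) : String :=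
  String.ofList (bcore tweet.toList)

-- ===== PRECONDITION & SPEC =====
def Spec_while_replace (tweet : String) (out : String) : Prop := out = while_replace_alt tweet
instance (tweet : String) (out : String) : Decidable (Spec_while_replace tweet out) := by unfold Spec_while_replace; infer_instance

-- ===== CLAIM (what is proved, stated in full; the proofs are below) =====
def Claim_equal_while_replace : Prop := ∀ (tweet : String), Dom_while_replace tweet → Spec_while_replace tweet (while_replace tweet)

-- ===== LEMMAS AND PROOFS =====

-- neighbour view of A's index loop: each char with its predecessor/successor (none at the ends)
def keep3 : Option Char × Char × Option Char → List Char :=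
  fun x => if x.1 = some x.2.1 ∧ x.2.2 = some x.2.1 then [] else [x.2.1]

def nbrs : Option Char → List Char → List (Option Char × Char × Option Char)
  | _, [] => []
  | p, c :: t => (p, c, t.head?) :: nbrs (some c) t

def nf (l : List Char) : List Char := (nbrs none l).flatMap keep3

theorem length_nbrs (p : Option Char) (t : List Char) : (nbrs p t).length = t.length := by
  induction t generalizing p with
  | nil => rfl
  | cons c t ih => simp [nbrs, ih]

theorem nbrs_getD (t : List Char) (p : Option Char) (k : Nat) (hk : k < t.length) :
    (nbrs p t).getD k (none, ' ', none) =
      ((if k = 0 then p else some (t.getD (k - 1) ' ')), t.getD k ' ', t[k + 1]?) := by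
  induction t generalizing p k with
  | nil => simp at hk
  | cons c t ih =>
    match k with
    | 0 => simp [nbrs, List.head?_eq_getElem?]
    | j + 1 =>
      have hj : j < t.length := by simp at hk; omega
      simp only [nbrs, List.getD_cons_succ]
      rw [ih (some c) j hj]
      match j with
      | 0 => simp
      | i + 1 => simp

theorem flatMap_range_getD {α β : Type} (l : List α) (d : α) (g : α → List β) :
    (List.range l.length).flatMap (fun i => g (l.getD i d)) = l.flatMap g := by
  induction l with
  | nil => simp
  | cons a l ih =>
    rw [List.length_cons, List.range_succ_eq_map]
    simp only [List.flatMap_cons, List.flatMap_map, List.getD_cons_zero, List.getD_cons_succ]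
    rw [ih]

theorem flatMap_congr_range {β : Type} (n : Nat) (f g : Nat → List β)
    (h : ∀ i, i < n → f i = g i) :
    (List.range n).flatMap f = (List.range n).flatMap g := by
  unfold List.flatMap
  congr 1
  exact List.map_congr_left (fun i hi => h i (List.mem_range.mp hi))

-- A's index loop computes nf
theorem loopA_eq_nf (t : List Char) :
    ((PySem.List.pyRange 0 (t.length : Int) 1).foldl
      (fun (new : List Char) index =>
        let char := PySem.List.pyGetD t index ' '
        if index = 0 ∨ index = (t.length : Int) - 1 then new ++ [char]
        else if PySem.List.pyGetD t (index - 1) ' ' = char ∧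
                PySem.List.pyGetD t (index + 1) ' ' = char then new
        else new ++ [char])
      []) = nf t := by
  have hbody : (fun (new : List Char) (index : Int) =>
      let char := PySem.List.pyGetD t index ' '
      if index = 0 ∨ index = (t.length : Int) - 1 then new ++ [char]
      else if PySem.List.pyGetD t (index - 1) ' ' = char ∧
              PySem.List.pyGetD t (index + 1) ' ' = char then new
      else new ++ [char]) =
      (fun (new : List Char) (index : Int) => new ++
        (if index = 0 ∨ index = (t.length : Int) - 1 then [PySem.List.pyGetD t index ' ']
         else if PySem.List.pyGetD t (index - 1) ' ' = PySem.List.pyGetD t index ' ' ∧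
                 PySem.List.pyGetD t (index + 1) ' ' = PySem.List.pyGetD t index ' ' then []
         else [PySem.List.pyGetD t index ' '])) := by
    funext new index
    simp only []
    split_ifs <;> simp
  rw [hbody, PySem.List.foldl_append_eq_flatMap, List.nil_append]
  rw [PySem.List.pyRange_one, nf,
      ← flatMap_range_getD (nbrs none t) (none, ' ', none) keep3, length_nbrs]
  rw [List.flatMap_map]
  have hlen : ((t.length : Int) - 0).toNat = t.length := by omega
  rw [hlen]
  apply flatMap_congr_range
  intro i hi
  rw [nbrs_getD t none i hi]
  simp only [zero_add]
  have hget : PySem.List.pyGetD t (i : Int) ' ' = t.getD i ' ' :=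
    PySem.List.pyGetD_natCast t i ' '
  by_cases hi0 : i = 0
  · subst hi0
    have hc : ((0 : Nat) : Int) = 0 ∨ ((0 : Nat) : Int) = (t.length : Int) - 1 := Or.inl (by simp)
    rw [if_pos hc, hget]
    simp [keep3]
  · by_cases hil : i = t.length - 1
    · have hc : (i : Int) = 0 ∨ (i : Int) = (t.length : Int) - 1 := Or.inr (by omega)
      rw [if_pos hc, hget]
      have hnone : t[i + 1]? = none := by
        rw [List.getElem?_eq_none_iff]; omega
      simp [keep3, hnone]
    · have hc : ¬((i : Int) = 0 ∨ (i : Int) = (t.length : Int) - 1) := by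
        rintro (h | h) <;> omega
      rw [if_neg hc, hget]
      have hm1 : (i : Int) - 1 = ((i - 1 : Nat) : Int) := by omega
      have hp1 : (i : Int) + 1 = ((i + 1 : Nat) : Int) := by omega
      rw [hm1, hp1]
      have hg1 : PySem.List.pyGetD t ((i - 1 : Nat) : Int) ' ' = t.getD (i - 1) ' ' :=
        PySem.List.pyGetD_natCast t (i - 1) ' '
      have hg2 : PySem.List.pyGetD t ((i + 1 : Nat) : Int) ' ' = t.getD (i + 1) ' ' :=
        PySem.List.pyGetD_natCast t (i + 1) ' '
      rw [hg1, hg2]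
      have hi1 : i + 1 < t.length := by omega
      have hsome : t[i + 1]? = some (t.getD (i + 1) ' ') := by
        rw [List.getElem?_eq_getElem hi1, List.getD_eq_getElem t ' ' hi1]
      simp only [keep3, hsome]
      rw [if_neg hi0]
      by_cases hcond : t.getD (i - 1) ' ' = t.getD i ' ' ∧ t.getD (i + 1) ' ' = t.getD i ' '
      · rw [if_pos hcond, if_pos ⟨congrArg some hcond.1, congrArg some hcond.2⟩]
      · rw [if_neg hcond,
            if_neg (fun h => hcond ⟨Option.some_inj.mp h.1, Option.some_inj.mp h.2⟩)]

-- rep facts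
theorem rep_head? (l : List Char) : (rep l).head? = l.head? := by
  induction l using rep.induct with
  | case1 t ih => simp [rep]
  | case2 c t hne ih =>
    match t, hne with
    | [], _ => simp [rep]
    | b :: t', hne =>
      rw [rep_cons₂ c b t' (by intro ⟨h1, h2⟩; exact hne t' h1 (by rw [h2]))]
      simp
  | case3 => simp [rep]

theorem rep_cons_nonspace (c : Char) (l : List Char) (hc : c ≠ ' ') :
    rep (c :: l) = c :: rep l := by
  match l with
  | [] => simp [rep]
  | b :: t => exact rep_cons₂ c b t (by intro ⟨h1, _⟩; exact hc h1)

theorem rep_replicate_nonspace (k : Nat) (c : Char) (rest : List Char) (hc : c ≠ ' ') :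
    rep (List.replicate k c ++ rest) = List.replicate k c ++ rep rest := by
  induction k with
  | zero => simp
  | succ j ih => simp only [List.replicate_succ, List.cons_append, rep_cons_nonspace _ _ hc, ih]

theorem rep_space_space (t : List Char) : rep (' ' :: ' ' :: t) = ' ' :: rep t := by
  simp [rep]

theorem rep_spaces : ∀ (k : Nat), 1 ≤ k → ∀ (rest : List Char), rest.head? ≠ some ' ' →
    rep (List.replicate k ' ' ++ rest) = List.replicate (k - k / 2) ' ' ++ rep rest := by
  intro k
  induction k using Nat.strong_induction_on with
  | _ k ih =>
    intro hk rest hr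
    match k, hk with
    | 1, _ =>
      simp only [List.replicate_one, List.singleton_append]
      match rest, hr with
      | [], _ => simp [rep]
      | r :: t, hr =>
        have hrc : ¬(' ' = ' ' ∧ r = ' ') := by
          simp at hr ⊢; exact hr
        rw [rep_cons₂ _ _ _ hrc]
        norm_num
    | j + 2, _ =>
      have h2 : List.replicate (j + 2) ' ' ++ rest = ' ' :: ' ' :: (List.replicate j ' ' ++ rest) := by
        simp [List.replicate_succ]
      rw [h2, rep_space_space]
      match j with
      | 0 => norm_num
      | i + 1 =>
        rw [ih (i + 1) (by omega) (by omega) rest hr]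
        have h3 : (i + 3) - (i + 3) / 2 = 1 + ((i + 1) - (i + 1) / 2) := by omega
        rw [h3, List.replicate_add]
        simp

-- takeWhile/dropWhile over a run
theorem takeWhile_run (j : Nat) (c : Char) (rest : List Char) (hr : rest.head? ≠ some c) :
    (List.replicate j c ++ rest).takeWhile (· == c) = List.replicate j c := by
  induction j with
  | zero =>
    match rest with
    | [] => rfl
    | r :: t =>
      have hrc : r ≠ c := by simp at hr; exact hr
      simp [hrc]
  | succ i ih => simp [List.replicate_succ, ih]

theorem dropWhile_run (j : Nat) (c : Char) (rest : List Char) (hr : rest.head? ≠ some c) :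
    (List.replicate j c ++ rest).dropWhile (· == c) = rest := by
  induction j with
  | zero =>
    match rest with
    | [] => rfl
    | r :: t =>
      have hrc : r ≠ c := by simp at hr; exact hr
      simp [hrc]
  | succ i ih => simp [List.replicate_succ, ih]

theorem bcore_run (k : Nat) (c : Char) (rest : List Char) (hk : 1 ≤ k)
    (hr : rest.head? ≠ some c) :
    bcore (List.replicate k c ++ rest) =
      (if c = ' ' then [' '] else List.replicate (min k 2) c) ++ bcore rest := by
  obtain ⟨j, rfl⟩ : ∃ j, k = j + 1 := ⟨k - 1, by omega⟩
  rw [List.replicate_succ, List.cons_append, bcore]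
  rw [takeWhile_run j c rest hr, dropWhile_run j c rest hr]
  simp [Nat.add_comm]

theorem head?_dropWhile (t : List Char) (c : Char) :
    (t.dropWhile (· == c)).head? ≠ some c := by
  induction t with
  | nil => simp
  | cons a t ih =>
    by_cases h : a = c
    · simpa [List.dropWhile_cons, h] using ih
    · have hb : (a == c) = false := by simp [h]
      simp only [List.dropWhile_cons, hb, Bool.false_eq_true, if_false, List.head?_cons]
      intro h'
      exact h (Option.some_inj.mp h')

theorem run_decomp (c : Char) (t : List Char) :
    c :: t = List.replicate ((t.takeWhile (· == c)).length + 1) c ++ t.dropWhile (· == c) := by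
  have htw : t.takeWhile (· == c) = List.replicate (t.takeWhile (· == c)).length c := by
    rw [List.eq_replicate_iff]
    exact ⟨rfl, fun b hb => by simpa using List.mem_takeWhile_imp hb⟩
  calc c :: t = c :: (t.takeWhile (· == c) ++ t.dropWhile (· == c)) := by
        rw [List.takeWhile_append_dropWhile]
    _ = _ := by
        rw [Nat.add_comm, List.replicate_add]
        simp [htw.symm]

theorem bcore_rep : ∀ (n : Nat) (s : List Char), s.length ≤ n → bcore (rep s) = bcore s := by
  intro n
  induction n with
  | zero =>
    intro s h
    have : s = [] := List.eq_nil_of_length_eq_zero (Nat.le_zero.mp h)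
    subst this; rfl
  | succ n ih =>
    intro s hs
    match s with
    | [] => rfl
    | c :: t =>
      have hd := run_decomp c t
      set j := (t.takeWhile (· == c)).length with hj
      set rest := t.dropWhile (· == c) with hrest
      have hrhd : rest.head? ≠ some c := head?_dropWhile t c
      have hlen : rest.length ≤ n := by
        rw [hrest]
        have := List.length_dropWhile_le (· == c) t
        simp at hs; omega
      by_cases hc : c = ' '
      · subst hc
        rw [hd, rep_spaces (j + 1) (by omega) rest hrhd]
        have hm : 1 ≤ (j + 1) - (j + 1) / 2 := by omega
        have hrr : (rep rest).head? ≠ some ' ' := by rw [rep_head?]; exact hrhd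
        rw [bcore_run _ _ _ hm hrr, bcore_run _ _ _ (by omega : 1 ≤ j + 1) hrhd]
        rw [ih rest hlen]
        simp
      · rw [hd, rep_replicate_nonspace _ _ _ hc]
        have hrr : (rep rest).head? ≠ some c := by rw [rep_head?]; exact hrhd
        rw [bcore_run _ _ _ (by omega : 1 ≤ j + 1) hrr,
            bcore_run _ _ _ (by omega : 1 ≤ j + 1) hrhd]
        rw [ih rest hlen]

-- no-double-space characterisation
theorem isChain_of_not_infix : ∀ (l : List Char), ¬([' ', ' '] <:+: l) →
    l.IsChain (fun a b => ¬(a = ' ' ∧ b = ' ')) := by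
  intro l
  induction l with
  | nil => intro _; exact List.isChain_nil
  | cons a t ih =>
    intro h
    match t with
    | [] => exact List.isChain_singleton a
    | b :: t' =>
      rw [List.isChain_cons_cons]
      constructor
      · intro ⟨ha, hb⟩
        exact h ⟨[], t', by simp [ha, hb]⟩
      · exact ih (fun hinf => h (hinf.trans (List.infix_cons (List.infix_refl (b :: t')))))

theorem isChain_of_not_isIn (l : List Char) (h : PySem.Chars.isIn [' ', ' '] l = false) :
    l.IsChain (fun a b => ¬(a = ' ' ∧ b = ' ')) := by
  apply isChain_of_not_infix
  exact (PySem.Chars.isIn_eq_false_iff _ _).mp h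

theorem prev_irrel (l : List Char) (p q : Option Char)
    (h : ∀ a, l.head? = some a → (p = some a ↔ q = some a)) :
    (nbrs p l).flatMap keep3 = (nbrs q l).flatMap keep3 := by
  match l with
  | [] => rfl
  | c :: t =>
    simp only [nbrs, List.flatMap_cons]
    congr 1
    simp only [keep3]
    have := h c (by simp)
    by_cases hp : p = some c
    · rw [if_congr (iff_of_eq rfl) rfl rfl]
      simp [hp, this.mp hp]
    · have hq : q ≠ some c := fun hq => hp (this.mpr hq)
      simp [hp, hq]

theorem nf_run_in : ∀ (j : Nat) (c : Char) (rest : List Char), rest.head? ≠ some c →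
    (nbrs (some c) (List.replicate j c ++ rest)).flatMap keep3 =
      (if j = 0 then [] else [c]) ++ (nbrs (some c) rest).flatMap keep3 := by
  intro j
  induction j with
  | zero => intro c rest hr; simp
  | succ i ih =>
    intro c rest hr
    rw [List.replicate_succ, List.cons_append]
    simp only [nbrs, List.flatMap_cons]
    match i with
    | 0 =>
      simp only [List.replicate_zero, List.nil_append]
      have hk : keep3 (some c, c, rest.head?) = [c] := by
        simp [keep3, hr]
      simp [hk]
    | i' + 1 =>
      have hhd : (List.replicate (i' + 1) c ++ rest).head? = some c := by
        simp [List.replicate_succ]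
      rw [hhd]
      have hk : keep3 (some c, c, some c) = [] := by simp [keep3]
      rw [hk, List.nil_append, ih c rest hr]
      simp

theorem nf_run (k : Nat) (c : Char) (rest : List Char) (hk : 1 ≤ k)
    (hr : rest.head? ≠ some c) (p : Option Char) (hp : p ≠ some c) :
    (nbrs p (List.replicate k c ++ rest)).flatMap keep3 =
      List.replicate (min k 2) c ++ (nbrs (some c) rest).flatMap keep3 := by
  obtain ⟨j, rfl⟩ : ∃ j, k = j + 1 := ⟨k - 1, by omega⟩
  rw [List.replicate_succ, List.cons_append]
  simp only [nbrs, List.flatMap_cons]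
  have hk1 : keep3 (p, c, (List.replicate j c ++ rest).head?) = [c] := by
    match j with
    | 0 => simp [keep3, hp]
    | i + 1 => simp [keep3, hp, List.replicate_succ]
  rw [hk1, nf_run_in j c rest hr]
  match j with
  | 0 => simp
  | i + 1 =>
    have : min (i + 1 + 1) 2 = 2 := by omega
    rw [this]
    simp [List.replicate_succ]

theorem nf_eq_bcore_of_isChain : ∀ (n : Nat) (s : List Char), s.length ≤ n →
    s.IsChain (fun a b => ¬(a = ' ' ∧ b = ' ')) → nf s = bcore s := by
  intro n
  induction n with
  | zero =>
    intro s hl _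
    have : s = [] := List.eq_nil_of_length_eq_zero (Nat.le_zero.mp hl)
    subst this; simp [nf, nbrs, bcore]
  | succ n ih =>
    intro s hl hch
    match s with
    | [] => simp [nf, nbrs, bcore]
    | c :: t =>
      have hd := run_decomp c t
      set j := (t.takeWhile (· == c)).length with hj
      set rest := t.dropWhile (· == c) with hrest
      have hrhd : rest.head? ≠ some c := head?_dropWhile t c
      have hlen : rest.length ≤ n := by
        rw [hrest]
        have := List.length_dropWhile_le (· == c) t
        simp at hl; omega
      have hchr : rest.IsChain (fun a b => ¬(a = ' ' ∧ b = ' ')) := by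
        rw [hd] at hch
        exact (List.isChain_append.mp hch).2.1
      have hnr : nf rest = bcore rest := ih rest hlen hchr
      have hstep : (nbrs (some c) rest).flatMap keep3 = nf rest := by
        apply prev_irrel
        intro a ha
        constructor
        · intro hca
          exfalso; rw [ha] at hrhd
          exact hrhd (by rw [Option.some_inj.mp hca])
        · intro hna; cases hna
      rw [hd, nf, nf_run (j + 1) c rest (by omega) hrhd none (by simp), hstep, hnr]
      by_cases hc : c = ' '
      · subst hc
        have hj0 : j = 0 := by
          by_contra hj0
          obtain ⟨i, hi⟩ : ∃ i, j = i + 1 := ⟨j - 1, by omega⟩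
          rw [hi] at hd
          rw [hd] at hch
          rw [show List.replicate (i + 1 + 1) ' ' ++ rest = ' ' :: ' ' :: (List.replicate i ' ' ++ rest) by
            simp [List.replicate_succ]] at hch
          rw [List.isChain_cons_cons] at hch
          exact hch.1 ⟨rfl, rfl⟩
        rw [hj0] at *
        clear hj0
        rw [bcore_run 1 ' ' rest (by omega) hrhd]
        simp
      · rw [bcore_run (j + 1) c rest (by omega) hrhd]
        simp [hc]

theorem main_eq (s : List Char) : nf (collapse s) = bcore s := by
  induction s using collapse.induct with
  | case1 l h ih =>
    rw [collapse, if_pos h, ih, replace_eq_rep]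
    exact bcore_rep l.length l le_rfl
  | case2 l h =>
    rw [collapse, if_neg h]
    exact nf_eq_bcore_of_isChain l.length l le_rfl
      (isChain_of_not_isIn l (Bool.not_eq_true _ ▸ eq_false_of_ne_true h))

-- ===== VERDICT (by name: the statement is the Claim_ definition above) =====
theorem while_replace_spec : Claim_equal_while_replace := by
  intro tweet _
  simp only [Spec_while_replace, while_replace, while_replace_alt]
  rw [loopA_eq_nf, main_eq]
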